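-- pv_equiv track=rewrite | github.com/akashvaghela09/python-practice-assignments | Phase F: Loops – Control Flow Only/10_break in while loops/test_10_nestedLoopBreakOnMarker.py | _expected_total
-- ===== SOURCE A (Python) =====
-- def _expected_total(lines):
--     total = 0
--     for line in lines:
--         if line.strip() == "END":
--             break
--         for token in line.split():
--             n = int(token)
--             if n == 0:
--                 break
--             total += n
--     return total
-- ===== SOURCE B (Python) =====
-- def _expected_total(lines):
--     # Stage 1: tokenize every line before the END marker (no parsing yet).
--     rows = []
--     for line in lines:
--         if line.strip() == "END":
--             break
--         rows.append(line.split())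
--     # Stage 2: one flat pass over a single token stream with None as line
--     # boundary; a skip flag (reset at each boundary) replaces the inner break,
--     # so tokens after a zero are never parsed.
--     flat = [t for row in rows for t in row + [None]]
--     total = 0
--     skipping = False
--     for t in flat:
--         if t is None:
--             skipping = False
--         elif not skipping:
--             n = int(t)
--             if n == 0:
--                 skipping = True
--             else:
--                 total += n
--     return total
-- ===== Notes on version B (the rewrite author's own statement) =====
-- stated objective: alternative
-- what changed: Replaced the nested break-loops by two staged passes: first cut the line list at the END marker and tokenize it, then run ONE flat loop over a single token stream with None line-boundary markers and a skip flag (reset at each boundary) instead of an inner loop with break.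
import Mathlib
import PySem

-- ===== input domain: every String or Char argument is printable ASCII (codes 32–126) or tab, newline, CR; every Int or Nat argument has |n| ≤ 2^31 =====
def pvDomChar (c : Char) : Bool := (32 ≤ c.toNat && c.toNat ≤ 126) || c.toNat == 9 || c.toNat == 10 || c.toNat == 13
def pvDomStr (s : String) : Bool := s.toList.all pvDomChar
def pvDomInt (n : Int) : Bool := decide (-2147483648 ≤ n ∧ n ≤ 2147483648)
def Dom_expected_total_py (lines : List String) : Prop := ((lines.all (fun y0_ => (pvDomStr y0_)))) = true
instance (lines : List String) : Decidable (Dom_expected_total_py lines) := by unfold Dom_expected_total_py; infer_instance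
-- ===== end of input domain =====

-- B replaces A's nested break-loops by two staged passes: cut/tokenize at END, then one flat loop over a boundary-marked token stream with a skip flag (alternative decomposition; same cost).


-- ===== PORT A =====
-- inner 'for token in line.split()' loop; none = the ValueError of int(token)
def pvAInner : List String → Int → Option Int
  | [], total => some total
  | t :: ts, total =>
    match PySem.Int.ofStr? t with
    | none => none
    | some n => if n = 0 then some total else pvAInner ts (total + n)

-- outer 'for line in lines' loop with its break on the END marker
def pvALoop : List String → Int → Option Int
  | [], total => some total
  | l :: ls, total =>
    if PySem.Str.strip l = "END" then some total
    else
      match pvAInner (PySem.Str.split₀ l) total with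
      | none => none
      | some t => pvALoop ls t

def expected_total_py (lines : List String) : Int := (pvALoop lines 0).getD 0

-- ===== PORT B =====
-- stage 1: 'rows' — tokenized lines before the END marker
def pvRows : List String → List (List String)
  | [] => []
  | l :: ls =>
    if PySem.Str.strip l = "END" then []
    else PySem.Str.split₀ l :: pvRows ls

-- the flat token stream: each row's tokens followed by a 'none' line boundary
def pvFlat (rows : List (List String)) : List (Option String) :=
  rows.flatMap (fun row => row.map some ++ [none])

-- stage 2: one step of the flat loop; outer 'none' = the ValueError of int(t)
def pvBStep : Option (Int × Bool) → Option String → Option (Int × Bool)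
  | none, _ => none
  | some (total, _), none => some (total, false)
  | some (total, skipping), some t =>
    if skipping then some (total, skipping)
    else
      match PySem.Int.ofStr? t with
      | none => none
      | some n => if n = 0 then some (total, true) else some (total + n, skipping)

def expected_total_py_alt (lines : List String) : Int :=
  match (pvFlat (pvRows lines)).foldl pvBStep (some ((0 : Int), false)) with
  | some (total, _) => total
  | none => 0

-- ===== PRECONDITION & SPEC =====
-- Pre_ excludes exactly the inputs where A raises ValueError: an unparsable token reached
-- before any zero token, on a line before the END marker.
def Pre_expected_total_py (lines : List String) : Prop :=
  ∀ l ∈ lines.takeWhile (fun l => !(PySem.Str.strip l == "END")),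
    ∀ t ∈ (PySem.Str.split₀ l).takeWhile (fun t => !(PySem.Int.ofStr? t == some (0:Int))),
      (PySem.Int.ofStr? t).isSome
instance (lines : List String) : Decidable (Pre_expected_total_py lines) := by
  unfold Pre_expected_total_py; infer_instance
def pvWitness_expected_total_py : List String := ["1 2", "3 0 bad", " END ", "x"]
def Spec_expected_total_py (lines : List String) (out : Int) : Prop := out = expected_total_py_alt lines
instance (lines : List String) (out : Int) : Decidable (Spec_expected_total_py lines out) := by unfold Spec_expected_total_py; infer_instance

-- ===== CLAIM (what is proved, stated in full; the proofs are below) =====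
def Claim_equal_expected_total_py : Prop := ∀ (lines : List String), Dom_expected_total_py lines → Pre_expected_total_py lines → Spec_expected_total_py lines (expected_total_py lines)

-- ===== LEMMAS AND PROOFS =====

-- with the skip flag set, the flat loop ignores every token up to the next boundary
lemma pvSkip_prop (toks : List String) (total : Int) :
    (toks.map some).foldl pvBStep (some (total, true)) = some (total, true) := by
  induction toks with
  | nil => simp
  | cons t ts ih => simpa [pvBStep] using ih

-- on a parseable-up-to-zero token list, A's inner loop returns some t and the flat
-- loop reaches the same total (with the skip flag recording whether a zero was hit)
lemma pvInner_fold (toks : List String) (total : Int)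
    (h : ∀ t ∈ toks.takeWhile (fun t => !(PySem.Int.ofStr? t == some (0:Int))),
      (PySem.Int.ofStr? t).isSome) :
    ∃ t b, pvAInner toks total = some t ∧
      (toks.map some).foldl pvBStep (some (total, false)) = some (t, b) := by
  induction toks generalizing total with
  | nil => exact ⟨total, false, rfl, rfl⟩
  | cons t ts ih =>
    cases hp : PySem.Int.ofStr? t with
    | none =>
      exfalso
      have := h t (by simp [List.takeWhile, hp])
      simp [hp] at this
    | some n =>
      by_cases hz : n = 0
      · subst hz
        exact ⟨total, true, by simp [pvAInner, hp], by
          simpa [pvBStep, hp] using pvSkip_prop ts total⟩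
      · have hb : (!(PySem.Int.ofStr? t == some (0:Int))) = true := by simp [hp, hz]
        have hts : ∀ t' ∈ ts.takeWhile (fun t => !(PySem.Int.ofStr? t == some (0:Int))),
            (PySem.Int.ofStr? t').isSome := by
          intro t' ht'
          refine h t' ?_
          simp only [List.takeWhile, hb]
          exact List.mem_cons_of_mem _ ht'
        obtain ⟨t', b, h1, h2⟩ := ih (total + n) hts
        exact ⟨t', b, by simp [pvAInner, hp, hz, h1], by simpa [pvBStep, hp, hz] using h2⟩

-- outer correspondence: under Pre_, A's loop returns some T and the flat loop over
-- pvFlat (pvRows lines) reaches the same T with the flag cleared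
lemma pvOuter (lines : List String) (total : Int)
    (h : Pre_expected_total_py lines) :
    ∃ T, pvALoop lines total = some T ∧
      (pvFlat (pvRows lines)).foldl pvBStep (some (total, false)) = some (T, false) := by
  induction lines generalizing total with
  | nil => exact ⟨total, rfl, rfl⟩
  | cons l ls ih =>
    by_cases hend : PySem.Str.strip l = "END"
    · exact ⟨total, by simp [pvALoop, hend], by simp [pvRows, hend, pvFlat]⟩
    · have hb : (!(PySem.Str.strip l == "END")) = true := by simp [hend]
      have hl : ∀ t ∈ (PySem.Str.split₀ l).takeWhile
          (fun t => !(PySem.Int.ofStr? t == some (0:Int))), (PySem.Int.ofStr? t).isSome := by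
        intro t ht
        refine h l ?_ t ht
        simp only [List.takeWhile, hb]
        exact List.mem_cons_self
      have hls : Pre_expected_total_py ls := by
        intro l' hl' t ht
        refine h l' ?_ t ht
        simp only [List.takeWhile, hb]
        exact List.mem_cons_of_mem _ hl'
      obtain ⟨t', b, hA, hF⟩ := pvInner_fold (PySem.Str.split₀ l) total hl
      obtain ⟨T, hAls, hFls⟩ := ih t' hls
      refine ⟨T, by simp [pvALoop, hend, hA, hAls], ?_⟩
      have : pvFlat (pvRows (l :: ls)) =
          ((PySem.Str.split₀ l).map some ++ [none]) ++ pvFlat (pvRows ls) := by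
        simp [pvRows, hend, pvFlat]
      rw [this, List.foldl_append, List.foldl_append, hF]
      simpa [pvBStep] using hFls

-- ===== VERDICT (by name: the statement is the Claim_ definition above) =====
theorem expected_total_py_spec : Claim_equal_expected_total_py := by
  intro lines _ hpre
  unfold Spec_expected_total_py expected_total_py expected_total_py_alt
  obtain ⟨T, hA, hB⟩ := pvOuter lines 0 hpre
  rw [hA, hB]
  rfl
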